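-- pv_equiv track=rewrite | github.com/atmichael7/matrix-kernel | kernel.py | rebuildMatrix
-- ===== SOURCE A (Python) =====
-- def rebuildMatrix(inputMatrix):
--     # the matrix is required to be uniform in length
--     inputHeight = len(inputMatrix)
--     inputLength = len(inputMatrix[0])
--
--     # build empty matrix of same size + 2 on each x and y for buffer
--     tempMatrix = [ [0 for y in range(inputLength+2)] for x in range(inputHeight+2) ]
--
--     # build left and right buffer zones & copy original data
--     for currRow in range(inputHeight):
--         for currIndex in range(inputLength):
--             tempMatrix[currRow+1][currIndex+1] = inputMatrix[currRow][currIndex]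
--
--     return tempMatrix
-- ===== SOURCE B (Python) =====
-- def rebuildMatrix(inputMatrix):
--     # Transpose-based padding: zip(*m) gives the columns (truncated to the
--     # shortest row, i.e. to len(m[0]) on uniform/over-long input); pad each
--     # column with a zero at top and bottom, then rebuild the rows from the
--     # padded columns, adding the left/right zero border as each row is formed.
--     paddedColumns = [(0,) + col + (0,) for col in zip(*inputMatrix)]
--     return [[0] + [col[r] for col in paddedColumns] + [0]
--             for r in range(len(inputMatrix) + 2)]
-- ===== Notes on version B (the rewrite author's own statement) =====
-- stated objective: alternative
-- what changed: B pads by transposition: it takes the columns via zip(*m), pads each column with a zero at top and bottom, and rebuilds the output rows from the padded columns adding the left/right zero border, instead of A's allocate-a-zero-(h+2)x(l+2)-matrix-then-overwrite-the-interior with nested index assignments.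
import Mathlib
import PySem

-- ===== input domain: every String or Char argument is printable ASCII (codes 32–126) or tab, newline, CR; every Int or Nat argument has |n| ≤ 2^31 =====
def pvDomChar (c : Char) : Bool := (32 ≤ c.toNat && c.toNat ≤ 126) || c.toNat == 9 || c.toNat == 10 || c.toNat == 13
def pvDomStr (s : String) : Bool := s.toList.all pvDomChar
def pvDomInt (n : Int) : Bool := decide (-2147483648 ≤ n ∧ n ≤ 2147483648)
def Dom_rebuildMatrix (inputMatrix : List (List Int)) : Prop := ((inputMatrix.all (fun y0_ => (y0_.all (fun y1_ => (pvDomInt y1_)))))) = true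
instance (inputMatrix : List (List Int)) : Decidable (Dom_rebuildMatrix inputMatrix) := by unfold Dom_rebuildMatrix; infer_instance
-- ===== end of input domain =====

-- B pads by transposition (zip the columns, pad each column, rebuild the rows)
-- instead of A's allocate-zero-matrix-then-overwrite-interior; return values agree on Pre_.

-- ===== PORT A =====
-- range(n) over the nonnegative loop indices is ported as List.range n (exact: both
-- enumerate 0..n-1).  inputMatrix[0], inputMatrix[r][i] and the assignments
-- tempMatrix[r+1][i+1] = … use in-range nonnegative indices under Pre_; out of that
-- range Python raises IndexError (excluded by Pre_) and getD/set here default.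
def rebuildMatrix (inputMatrix : List (List Int)) : List (List Int) :=
  let inputHeight := inputMatrix.length
  let inputLength := (inputMatrix.getD 0 []).length
  let tempMatrix := List.replicate (inputHeight + 2) (List.replicate (inputLength + 2) (0 : Int))
  (List.range inputHeight).foldl
    (fun t currRow =>
      (List.range inputLength).foldl
        (fun t currIndex =>
          t.set (currRow + 1)
            ((t.getD (currRow + 1) []).set (currIndex + 1)
              ((inputMatrix.getD currRow []).getD currIndex 0)))
        t)
    tempMatrix

-- ===== PORT B =====
-- zip(*m): the list of columns, truncated to the shortest row, exactly Python's zip: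
-- emit the heads while every row is nonempty, recurse on the tails.
def pyZipCols (m : List (List Int)) : List (List Int) :=
  if h : m ≠ [] ∧ m.all (fun r => !r.isEmpty) then
    m.map (fun r => r.headD 0) :: pyZipCols (m.map (fun r => r.tail))
  else []
termination_by ((m.getD 0 []).length)
decreasing_by
  obtain ⟨hne, hall⟩ := h
  cases m with
  | nil => exact absurd rfl hne
  | cons r0 rest =>
    have h0 : !r0.isEmpty := by
      have := List.all_eq_true.mp hall r0 (by simp)
      simpa using this
    cases r0 with
    | nil => simp at h0
    | cons a t => simp [List.getD]

-- col[r] uses an in-range index (each padded column has height h+2, r < h+2): getD is exact.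
def rebuildMatrix_alt (inputMatrix : List (List Int)) : List (List Int) :=
  let paddedColumns := (pyZipCols inputMatrix).map (fun col => [(0 : Int)] ++ col ++ [(0 : Int)])
  (List.range (inputMatrix.length + 2)).map
    (fun r => [(0 : Int)] ++ paddedColumns.map (fun col => col.getD r 0) ++ [(0 : Int)])

-- ===== PRECONDITION & SPEC =====
-- Pre_ excludes exactly the inputs on which A raises IndexError: the empty matrix
-- (inputMatrix[0]) and matrices with a row shorter than the first row.
def Pre_rebuildMatrix (inputMatrix : List (List Int)) : Prop :=
  inputMatrix ≠ [] ∧ ∀ row ∈ inputMatrix, (inputMatrix.getD 0 []).length ≤ row.length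
instance (inputMatrix : List (List Int)) : Decidable (Pre_rebuildMatrix inputMatrix) := by
  unfold Pre_rebuildMatrix; infer_instance

def pvWitness_rebuildMatrix : List (List Int) := [[1, 2], [3, 4]]

def Spec_rebuildMatrix (inputMatrix : List (List Int)) (out : List (List Int)) : Prop := out = rebuildMatrix_alt inputMatrix
instance (inputMatrix : List (List Int)) (out : List (List Int)) : Decidable (Spec_rebuildMatrix inputMatrix out) := by unfold Spec_rebuildMatrix; infer_instance

-- ===== CLAIM (what is proved, stated in full; the proofs are below) =====
def Claim_equal_rebuildMatrix : Prop := ∀ (inputMatrix : List (List Int)), Dom_rebuildMatrix inputMatrix → Pre_rebuildMatrix inputMatrix → Spec_rebuildMatrix inputMatrix (rebuildMatrix inputMatrix)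

-- ===== LEMMAS AND PROOFS =====

-- ---- A-side: A's fold equals the bordered-rows form ----

-- filling a suffix: setting positions 0..l-1 of z (l ≤ z.length) yields the map plus z's tail
theorem pv_row_fill (f : Nat → Int) :
    ∀ (l : Nat) (z : List Int), l ≤ z.length →
      (List.range l).foldl (fun row i => row.set i (f i)) z
        = (List.range l).map f ++ z.drop l := by
  intro l
  induction l with
  | zero => intro z _; simp
  | succ l ih =>
    intro z hz
    rw [List.range_succ, List.foldl_append, List.foldl_cons, List.foldl_nil,
      ih z (by omega), List.map_append]
    have hlen : ((List.range l).map f).length = l := by simp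
    rw [List.set_append_right _ _ (by omega)]
    have hdz : l < z.length := by omega
    have hset0 : (z.drop l).set 0 (f l) = f l :: z.drop (l + 1) := by
      rw [← List.tail_drop]
      cases hd : z.drop l with
      | nil => exfalso; simp at hd; omega
      | cons a t => simp
    simp [hlen, hset0]

-- the inner loop over one matrix row, lifted to the whole-matrix fold
theorem pv_inner (f : Nat → Int) (r : Nat) :
    ∀ (l : Nat) (t : List (List Int)), r + 1 < t.length →
      (List.range l).foldl
          (fun t i => t.set (r + 1) ((t.getD (r + 1) []).set (i + 1) (f i))) t
        = t.set (r + 1)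
            ((List.range l).foldl (fun row i => row.set (i + 1) (f i)) (t.getD (r + 1) [])) := by
  intro l
  induction l with
  | zero =>
    intro t ht
    simp [List.getD, List.getElem?_eq_getElem ht]
  | succ l ih =>
    intro t ht
    rw [List.range_succ, List.foldl_append, List.foldl_append, List.foldl_cons,
      List.foldl_cons, List.foldl_nil, List.foldl_nil, ih t ht]
    have hset : ∀ (R : List Int),
        (t.set (r + 1) R).getD (r + 1) [] = R := by
      intro R
      simp [List.getD_eq_getElem?_getD, ht]
    rw [hset, List.set_set]

-- one padded row: interior fill of a zero row equals the bordered row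
theorem pv_one_row (f : Nat → Int) (l : Nat) :
    (List.range l).foldl (fun row i => row.set (i + 1) (f i))
        (List.replicate (l + 2) (0 : Int))
      = [(0 : Int)] ++ (List.range l).map f ++ [(0 : Int)] := by
  have h : List.replicate (l + 2) (0 : Int) = 0 :: List.replicate (l + 1) (0 : Int) := rfl
  rw [h]
  have hcons : (List.range l).foldl (fun row i => row.set (i + 1) (f i))
      (0 :: List.replicate (l + 1) (0 : Int))
      = 0 :: (List.range l).foldl (fun row i => row.set i (f i))
          (List.replicate (l + 1) (0 : Int)) := by
    have : ∀ (is : List Nat) (z : List Int),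
        is.foldl (fun row i => row.set (i + 1) (f i)) ((0 : Int) :: z)
          = 0 :: is.foldl (fun row i => row.set i (f i)) z := by
      intro is
      induction is with
      | nil => intro z; rfl
      | cons a as ih => intro z; simp [List.foldl_cons, ih]
    exact this _ _
  rw [hcons, pv_row_fill f l (List.replicate (l + 1) (0 : Int)) (by simp)]
  have : (List.replicate (l + 1) (0 : Int)).drop l = [(0 : Int)] := by
    rw [List.drop_replicate]; simp
  simp [this]

-- the outer loop: after k steps rows 1..k of the zero matrix are the bordered rows of take k
theorem pv_outer (m : List (List Int)) (l : Nat) :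
    ∀ (k : Nat), k ≤ m.length →
      (List.range k).foldl
          (fun t currRow =>
            (List.range l).foldl
              (fun t currIndex =>
                t.set (currRow + 1)
                  ((t.getD (currRow + 1) []).set (currIndex + 1)
                    ((m.getD currRow []).getD currIndex 0)))
              t)
          (List.replicate (m.length + 2) (List.replicate (l + 2) (0 : Int)))
        = List.replicate (l + 2) (0 : Int)
            :: (m.take k).map (fun row => [(0 : Int)] ++ (List.range l).map (fun i => row.getD i 0) ++ [(0 : Int)])
            ++ List.replicate (m.length + 1 - k) (List.replicate (l + 2) (0 : Int)) := by
  intro k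
  induction k with
  | zero =>
    intro _
    simp [List.replicate_succ]
  | succ k ih =>
    intro hk
    rw [List.range_succ, List.foldl_append, List.foldl_cons, List.foldl_nil, ih (by omega)]
    set zrow := List.replicate (l + 2) (0 : Int) with hz
    set pre := (m.take k).map (fun row => [(0 : Int)] ++ (List.range l).map (fun i => row.getD i 0) ++ [(0 : Int)]) with hpre
    have hprelen : pre.length = k := by
      simp [hpre, List.length_take, Nat.min_eq_left (by omega : k ≤ m.length)]
    have hrep : List.replicate (m.length + 1 - k) zrow
        = zrow :: List.replicate (m.length - k) zrow := by
      have : m.length + 1 - k = (m.length - k) + 1 := by omega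
      rw [this, List.replicate_succ]
    have hT : (zrow :: pre ++ List.replicate (m.length + 1 - k) zrow).length = m.length + 2 := by
      simp [hprelen]; omega
    rw [pv_inner _ _ l _ (by rw [hT]; omega)]
    have hget : (zrow :: pre ++ List.replicate (m.length + 1 - k) zrow).getD (k + 1) [] = zrow := by
      have : zrow :: pre ++ List.replicate (m.length + 1 - k) zrow
          = (zrow :: pre) ++ List.replicate (m.length + 1 - k) zrow := by simp
      rw [this, List.getD_eq_getElem?_getD, List.getElem?_append_right (by simp [hprelen])]
      simp [hprelen, hrep]
    rw [hget, pv_one_row]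
    have hsetc : (zrow :: pre ++ List.replicate (m.length + 1 - k) zrow).set (k + 1)
          ([(0 : Int)] ++ (List.range l).map (fun i => (m.getD k []).getD i 0) ++ [(0 : Int)])
        = zrow :: (pre ++ [[(0 : Int)] ++ (List.range l).map (fun i => (m.getD k []).getD i 0) ++ [(0 : Int)]])
            ++ List.replicate (m.length - k) zrow := by
      have hassoc : zrow :: pre ++ List.replicate (m.length + 1 - k) zrow
          = (zrow :: pre) ++ List.replicate (m.length + 1 - k) zrow := rfl
      rw [hassoc, List.set_append_right _ _ (by simp [hprelen]), hrep]
      simp [hprelen]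
    rw [hsetc]
    have hmk : m.take (k + 1) = m.take k ++ [m.getD k []] := by
      have hklt : k < m.length := by omega
      rw [List.take_add_one, List.getElem?_eq_getElem hklt]
      simp [List.getD_eq_getElem?_getD, List.getElem?_eq_getElem hklt]
    rw [hmk]
    simp [hpre]

-- ---- B-side: the zip/transpose form equals the bordered-rows form ----

-- tail-then-getD is getD at the successor index (any list)
theorem pv_tail_getD (row : List Int) (i : Nat) :
    row.tail.getD i 0 = row.getD (i + 1) 0 := by
  cases row <;> simp [List.getD]

-- zip(*m) under Pre_: column i is the i-th entry of every row, for i < len(m[0])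
theorem pv_zip_cols :
    ∀ (l : Nat) (m : List (List Int)), m ≠ [] →
      (m.getD 0 []).length = l → (∀ row ∈ m, l ≤ row.length) →
      pyZipCols m = (List.range l).map (fun i => m.map (fun row => row.getD i 0)) := by
  intro l
  induction l with
  | zero =>
    intro m hne h0 _
    have hcond : ¬ (m ≠ [] ∧ m.all (fun r => !r.isEmpty) = true) := by
      rintro ⟨-, hall2⟩
      cases m with
      | nil => exact hne rfl
      | cons r0 rest =>
        have hr0 := List.all_eq_true.mp hall2 r0 (by simp)
        have hr0e : r0 = [] := List.eq_nil_of_length_eq_zero (by simpa using h0)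
        simp [hr0e] at hr0
    rw [pyZipCols, dif_neg hcond]
    simp
  | succ l ih =>
    intro m hne h0 hall
    have hallne : m.all (fun r => !r.isEmpty) = true := by
      rw [List.all_eq_true]
      intro r hr
      have hlr := hall r hr
      have : r.length ≠ 0 := by omega
      simpa [List.isEmpty_iff_length_eq_zero] using this
    rw [pyZipCols, dif_pos ⟨hne, hallne⟩]
    have hne' : m.map (fun r => r.tail) ≠ [] := by simp [hne]
    have h0' : ((m.map (fun r => r.tail)).getD 0 []).length = l := by
      cases m with
      | nil => exact absurd rfl hne
      | cons r0 rest =>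
        simp only [List.map_cons, List.getD_cons_zero] at h0 ⊢
        rw [List.length_tail, h0]
        omega
    have hall' : ∀ row ∈ m.map (fun r => r.tail), l ≤ row.length := by
      intro row hrow
      obtain ⟨r, hr, rfl⟩ := List.mem_map.mp hrow
      have := hall r hr
      rw [List.length_tail]; omega
    rw [ih _ hne' h0' hall']
    rw [List.range_succ_eq_map, List.map_cons]
    congr 1
    · apply List.map_congr_left
      intro r _
      cases r <;> simp [List.getD]
    · rw [List.map_map]
      apply List.map_congr_left
      intro i _
      simp only [Function.comp_apply, List.map_map]
      apply List.map_congr_left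
      intro r _
      exact pv_tail_getD r i

-- getD of one zero-padded column: interior entry for 1 ≤ r ≤ length, border zero otherwise
theorem pv_pad_get (c : List Int) (r : Nat) :
    ((0 : Int) :: (c ++ [0])).getD r 0
      = if 1 ≤ r ∧ r ≤ c.length then c.getD (r - 1) 0 else 0 := by
  cases r with
  | zero => simp
  | succ r' =>
    simp only [List.getD_cons_succ]
    by_cases hr : r' < c.length
    · rw [List.getD_append _ _ _ _ hr, if_pos ⟨by omega, by omega⟩]
      simp
    · rw [List.getD_append_right _ _ _ _ (by omega), if_neg (by omega)]
      cases r' - c.length <;> simp [List.getD]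

-- map over range of getD collapses to a plain map
theorem pv_map_range_getD (m : List (List Int)) (g : List Int → List Int) :
    (List.range m.length).map (fun j => g (m.getD j [])) = m.map g := by
  apply List.ext_getElem
  · simp
  · intro j h1 h2
    simp only [List.getElem_map, List.getElem_range]
    have : j < m.length := by simpa using h2
    simp [List.getD_eq_getElem?_getD, List.getElem?_eq_getElem this]

-- B equals the bordered-rows form under Pre_
theorem pv_alt_form (m : List (List Int)) (hne : m ≠ [])
    (hall : ∀ row ∈ m, (m.getD 0 []).length ≤ row.length) :
    rebuildMatrix_alt m
      = List.replicate ((m.getD 0 []).length + 2) (0 : Int)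
          :: m.map (fun row => [(0 : Int)] ++ (List.range (m.getD 0 []).length).map (fun i => row.getD i 0) ++ [(0 : Int)])
          ++ [List.replicate ((m.getD 0 []).length + 2) (0 : Int)] := by
  set l := (m.getD 0 []).length with hl
  unfold rebuildMatrix_alt
  rw [pv_zip_cols l m hne hl.symm hall]
  simp only [List.map_map, Function.comp_def, List.cons_append, List.nil_append]
  have hsplit : List.range (m.length + 2)
      = 0 :: ((List.range m.length).map Nat.succ ++ [m.length + 1]) := by
    rw [show m.length + 2 = (m.length + 1) + 1 from rfl, List.range_succ,
      List.range_succ_eq_map, List.cons_append]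
  rw [hsplit, List.map_cons, List.map_append, List.map_map]
  simp only [Function.comp_def]
  have hclen : ∀ i : Nat, (m.map (fun row => row.getD i 0)).length = m.length := by
    intro i; simp
  have hzero : (0 : Int) :: (List.replicate l (0 : Int) ++ [0]) = List.replicate (l + 2) (0 : Int) := by
    rw [show l + 2 = (l + 1) + 1 from rfl, List.replicate_succ, List.replicate_succ']
  congr 1
  · -- row 0 is the zero border row
    have h0 : (List.range l).map
        (fun i => ((0 : Int) :: (m.map (fun row => row.getD i 0) ++ [0])).getD 0 0)
        = List.replicate l (0 : Int) := by
      simp [List.map_const']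
    rw [h0, hzero]
  congr 1
  · -- interior rows
    have hstep : ∀ j ∈ List.range m.length,
        ((0 : Int) :: ((List.range l).map
            (fun i => ((0 : Int) :: (m.map (fun row => row.getD i 0) ++ [0])).getD (Nat.succ j) 0) ++ [0]))
          = (0 : Int) :: ((List.range l).map (fun i => (m.getD j []).getD i 0) ++ [0]) := by
      intro j hj
      have hjh : j < m.length := List.mem_range.mp hj
      congr 2
      apply List.map_congr_left
      intro i _
      rw [pv_pad_get, if_pos ⟨by omega, by rw [hclen]; omega⟩]
      have : (m.map (fun row => row.getD i 0)).getD j 0 = (m.getD j []).getD i 0 := by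
        simp [List.getD_eq_getElem?_getD, List.getElem?_eq_getElem hjh]
      simpa [Nat.succ_sub_one] using this
    calc (List.range m.length).map _
        = (List.range m.length).map
            (fun j => (0 : Int) :: ((List.range l).map (fun i => (m.getD j []).getD i 0) ++ [0])) := by
          apply List.map_congr_left
          intro j hj
          exact hstep j hj
      _ = m.map (fun row => (0 : Int) :: ((List.range l).map (fun i => row.getD i 0) ++ [0])) :=
          pv_map_range_getD m (fun row => (0 : Int) :: ((List.range l).map (fun i => row.getD i 0) ++ [0]))
  · -- last row is the zero border row
    have hlast : (List.range l).map
        (fun i => ((0 : Int) :: (m.map (fun row => row.getD i 0) ++ [0])).getD (m.length + 1) 0)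
        = List.replicate l (0 : Int) := by
      have : ∀ i ∈ List.range l,
          ((0 : Int) :: (m.map (fun row => row.getD i 0) ++ [0])).getD (m.length + 1) 0 = 0 := by
        intro i _
        rw [pv_pad_get, if_neg (by rw [hclen]; omega)]
      rw [List.map_congr_left this]
      simp [List.map_const']
    simp only [List.map_cons, List.map_nil]
    rw [hlast, hzero]

-- ===== VERDICT (by name: the statement is the Claim_ definition above) =====
theorem rebuildMatrix_spec : Claim_equal_rebuildMatrix := by
  intro m _ hpre
  obtain ⟨hne, hall⟩ := hpre
  unfold Spec_rebuildMatrix rebuildMatrix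
  simp only
  rw [pv_outer m (m.getD 0 []).length m.length (le_refl _)]
  rw [pv_alt_form m hne hall]
  simp [List.take_length]
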